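-- pv_equiv track=rewrite | github.com/ADA-SITE-JML/gesture_face_features | code/main/feature_old.py | filter_ids
-- ===== SOURCE A (Python) =====
-- def filter_ids(features, img_id_list):
--   return {
--       model_name: {
--           img_id: feats
--           for img_id, feats in img_dict.items()
--           if img_id in img_id_list
--       }
--       for model_name, img_dict in features.items()
--   }
-- ===== SOURCE B (Python) =====
-- def filter_ids(features, img_id_list):
--     allowed = set(img_id_list)
--     result = {}
--     for model_name, img_dict in features.items():
--         kept = dict(img_dict)
--         for img_id in img_dict.keys() - allowed:
--             del kept[img_id]
--         result[model_name] = kept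
--     return result
-- ===== Notes on version B (the rewrite author's own statement) =====
-- stated objective: faster
-- what changed: Instead of A's additive nested comprehension that keeps keys passing a linear list-membership test, B is subtractive: it copies each inner dict, computes the set of keys to drop by set difference (keys - set(img_id_list)), and deletes exactly those keys; membership scans of the list disappear.
import Mathlib
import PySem

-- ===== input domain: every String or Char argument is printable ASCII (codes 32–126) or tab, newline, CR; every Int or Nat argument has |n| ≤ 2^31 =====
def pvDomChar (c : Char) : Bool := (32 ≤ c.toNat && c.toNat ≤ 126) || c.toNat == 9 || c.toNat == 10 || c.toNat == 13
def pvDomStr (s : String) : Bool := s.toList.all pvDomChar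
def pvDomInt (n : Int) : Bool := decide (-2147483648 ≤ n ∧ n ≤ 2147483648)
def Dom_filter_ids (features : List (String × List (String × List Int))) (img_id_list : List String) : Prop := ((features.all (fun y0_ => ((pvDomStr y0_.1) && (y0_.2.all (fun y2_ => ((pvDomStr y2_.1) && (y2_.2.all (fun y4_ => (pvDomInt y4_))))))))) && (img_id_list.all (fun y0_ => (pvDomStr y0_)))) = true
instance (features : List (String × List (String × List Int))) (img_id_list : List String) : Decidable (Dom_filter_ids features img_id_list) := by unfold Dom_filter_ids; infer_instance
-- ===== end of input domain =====

-- B is subtractive instead of A's additive filter: it copies each inner dict, computes the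
-- set of keys to drop by set difference, and deletes exactly those keys — faster because the
-- per-key linear scan of img_id_list disappears.

-- ===== PORT A =====
-- A: dict comprehension over features.items(); inner comprehension keeps pairs whose key
-- passes the list-membership test 'img_id in img_id_list'.
def filter_ids (features : List (String × List (String × List Int))) (img_id_list : List String) : List (String × List (String × List Int)) :=
  features.map (fun md =>
    (md.1, md.2.filter (fun p => img_id_list.contains p.1)))

-- ===== PORT B =====
-- B: allowed = set(img_id_list); for each model copy img_dict, form drop = keys - allowed
-- (a Python set; its hash iteration order is unspecified, but deletions commute, so the
-- port's insertion-order iteration of the same set yields the same dict), delete each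
-- dropped key from the copy, and append the result.
def filter_ids_alt (features : List (String × List (String × List Int))) (img_id_list : List String) : List (String × List (String × List Int)) :=
  let allowed : PySem.Set String := PySem.Set.ofList img_id_list
  features.foldl (fun result md =>
    let drop : PySem.Set String := PySem.Set.diff (PySem.Set.ofList (md.2.map Prod.fst)) allowed
    let kept := drop.foldl (fun d k => PySem.Dict.erase d k) (PySem.Dict.mk md.2)
    result ++ [(md.1, kept.items)]) []

-- ===== PRECONDITION & SPEC =====
def Spec_filter_ids (features : List (String × List (String × List Int))) (img_id_list : List String) (out : List (String × List (String × List Int))) : Prop := out = filter_ids_alt features img_id_list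
instance (features : List (String × List (String × List Int))) (img_id_list : List String) (out : List (String × List (String × List Int))) : Decidable (Spec_filter_ids features img_id_list out) := by unfold Spec_filter_ids; infer_instance

-- ===== CLAIM (what is proved, stated in full; the proofs are below) =====
def Claim_equal_filter_ids : Prop := ∀ (features : List (String × List (String × List Int))) (img_id_list : List String), Dom_filter_ids features img_id_list → Spec_filter_ids features img_id_list (filter_ids features img_id_list)

-- ===== LEMMAS AND PROOFS =====

-- folding Dict.erase over a key list filters out every pair whose key is in that list
theorem items_foldl_erase (ks : List String) (l : List (String × List Int)) :
    (ks.foldl (fun d k => PySem.Dict.erase d k) (PySem.Dict.mk l)).items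
      = l.filter (fun p => !ks.contains p.1) := by
  induction ks generalizing l with
  | nil => simp
  | cons k ks ih =>
      have herase : PySem.Dict.erase (PySem.Dict.mk l) k
          = PySem.Dict.mk (l.filter (fun p => !p.1 == k)) := rfl
      rw [List.foldl_cons, herase, ih, List.filter_filter]
      apply List.filter_congr
      intro p _
      by_cases h : p.1 = k <;> simp [h]

-- per model: B's copy-then-delete equals A's membership filter
theorem inner_eq (l : List (String × List Int)) (img_id_list : List String) :
    ((PySem.Set.diff (PySem.Set.ofList (l.map Prod.fst)) (PySem.Set.ofList img_id_list)).foldl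
        (fun d k => PySem.Dict.erase d k) (PySem.Dict.mk l)).items
      = l.filter (fun p => img_id_list.contains p.1) := by
  rw [items_foldl_erase]
  apply List.filter_congr
  intro p hp
  have hkey : p.1 ∈ l.map Prod.fst := List.mem_map_of_mem hp
  by_cases h : img_id_list.contains p.1
  · have : p.1 ∉ PySem.Set.diff (PySem.Set.ofList (l.map Prod.fst)) (PySem.Set.ofList img_id_list) := by
      simp only [PySem.Set.mem_diff, PySem.Set.mem_ofList]
      simp only [List.contains_eq_mem, decide_eq_true_eq] at h
      simp [h]
    simp_all
  · have : p.1 ∈ PySem.Set.diff (PySem.Set.ofList (l.map Prod.fst)) (PySem.Set.ofList img_id_list) := by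
      simp only [PySem.Set.mem_diff, PySem.Set.mem_ofList]
      simp only [List.contains_eq_mem, decide_eq_true_eq] at h
      exact ⟨hkey, h⟩
    simp_all

-- ===== VERDICT (by name: the statement is the Claim_ definition above) =====
theorem filter_ids_spec : Claim_equal_filter_ids := by
  intro features img_id_list _
  unfold Spec_filter_ids filter_ids filter_ids_alt
  simp only [inner_eq, PySem.List.foldl_append_singleton_eq_map, List.nil_append]
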